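-- pv_equiv track=rewrite | github.com/rsinha/libmoat | experimental/util.py | compute_edits
-- ===== SOURCE A (Python) =====
-- def compute_edits(old, new):
--     """Compute the in-place edits needed to convert from old to new
--
--     Returns a list ``[(index_1,change_1), (index_2,change_2)...]``
--     where ``index_i`` is an offset into old, and ``change_1`` is the
--     new bytes to replace.
--
--     For example, calling ``compute_edits("abcdef", "qbcdzw")`` will return
--     ``[(0, "q"), (4, "zw")]``.
--
--     That is, the update should be preformed as (abusing notation):
--
--     ``new[index:index+len(change)] = change``
--
--     :param str old: The old data
--     :param str new: The new data
--
--     :returns: A list of tuples (index_i, change_i)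
--     """
--     deltas = []
--     delta = None
--     for index, (n, o) in enumerate(zip(new, old)):
--         if n == o:
--             if delta is not None:
--                 deltas.append(delta)
--                 delta = None
--         else:
--             if delta is None:
--                 delta = (index, [])
--             delta[1].append(n)
--
--     if delta is not None:
--         deltas.append(delta)
--
--     return [(i, "".join(x)) for i, x in deltas]
-- ===== SOURCE B (Python) =====
-- def compute_edits(old, new):
--     m = min(len(old), len(new))
--     res = []
--     i = 0
--     while i < m:
--         if new[i] == old[i]:
--             i += 1
--             continue
--         j = i + 1
--         while j < m and new[j] != old[j]:
--             j += 1
--         res.append((i, new[i:j]))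
--         i = j
--     return res
-- ===== Notes on version B (the rewrite author's own statement) =====
-- stated objective: alternative
-- what changed: Replaced A's single fold carrying a pending (index, char-list) accumulator state with a two-pointer index scan: find the start of each mismatch run, advance a second pointer to its end, and emit the run directly as the slice new[i:j].
import Mathlib
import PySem

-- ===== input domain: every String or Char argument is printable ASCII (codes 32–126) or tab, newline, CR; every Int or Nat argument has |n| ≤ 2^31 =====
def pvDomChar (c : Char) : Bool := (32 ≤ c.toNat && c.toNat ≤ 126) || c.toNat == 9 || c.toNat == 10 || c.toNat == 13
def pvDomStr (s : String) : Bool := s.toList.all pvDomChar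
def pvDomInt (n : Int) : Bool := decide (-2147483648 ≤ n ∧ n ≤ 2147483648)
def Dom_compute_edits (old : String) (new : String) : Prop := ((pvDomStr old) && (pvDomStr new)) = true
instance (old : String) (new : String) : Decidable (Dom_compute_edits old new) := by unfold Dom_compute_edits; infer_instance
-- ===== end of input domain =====

-- B replaces A's fold with a pending-run accumulator by a two-pointer scan emitting slices (alternative decomposition, same cost).

-- ===== PORT A =====
-- one loop step of A: state = (deltas, delta), item = (index, (n, o))
def stepA (st : List (Int × List Char) × Option (Int × List Char))
    (p : Int × (Char × Char)) : List (Int × List Char) × Option (Int × List Char) :=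
  let deltas := st.1
  let delta := st.2
  let n := p.2.1
  let o := p.2.2
  if n == o then
    match delta with
    | some d => (deltas ++ [d], none)
    | none => (deltas, none)
  else
    match delta with
    | none => (deltas, some (p.1, [n]))
    | some (i, xs) => (deltas, some (i, xs ++ [n]))

def compute_edits (old : String) (new : String) : List (Int × String) :=
  let r := (PySem.List.enumerate (new.toList.zip old.toList) 0).foldl stepA ([], none)
  let deltas := match r.2 with
    | some d => r.1 ++ [d]
    | none => r.1
  deltas.map (fun p => (p.1, String.mk p.2))   -- "".join of a list of chars

-- ===== PORT B =====
-- inner while: advance j while j < m and new[j] != old[j]; getD is exact since j < m ≤ length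
def bScan (nl ol : List Char) (m j : Nat) : Nat :=
  if h : j < m ∧ nl.getD j ' ' ≠ ol.getD j ' ' then bScan nl ol m (j + 1) else j
termination_by m - j
decreasing_by omega

theorem le_bScan (nl ol : List Char) (m j : Nat) : j ≤ bScan nl ol m j := by
  unfold bScan
  split
  · exact le_trans (Nat.le_succ j) (le_bScan nl ol m (j + 1))
  · exact le_refl j
termination_by m - j
decreasing_by omega

-- outer while over i
def bLoop (nl ol : List Char) (m i : Nat) : List (Int × String) :=
  if h : i < m then
    if nl.getD i ' ' == ol.getD i ' ' then bLoop nl ol m (i + 1)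
    else
      ((i : Int), String.mk (PySem.List.slice nl (some (i : Int)) (some (bScan nl ol m (i + 1) : Int)))) ::
        bLoop nl ol m (bScan nl ol m (i + 1))
  else []
termination_by m - i
decreasing_by
  · omega
  · have := le_bScan nl ol m (i + 1); omega

def compute_edits_alt (old : String) (new : String) : List (Int × String) :=
  bLoop new.toList old.toList (min old.toList.length new.toList.length) 0

-- ===== PRECONDITION & SPEC =====
def Spec_compute_edits (old : String) (new : String) (out : List (Int × String)) : Prop := out = compute_edits_alt old new
instance (old : String) (new : String) (out : List (Int × String)) : Decidable (Spec_compute_edits old new out) := by unfold Spec_compute_edits; infer_instance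

-- ===== CLAIM (what is proved, stated in full; the proofs are below) =====
def Claim_equal_compute_edits : Prop := ∀ (old : String) (new : String), Dom_compute_edits old new → Spec_compute_edits old new (compute_edits old new)

-- ===== LEMMAS AND PROOFS =====

-- common recursive characterization of the run structure
def core (d : Option (Int × List Char)) (L : List (Char × Char)) (k : Int) : List (Int × List Char) :=
  match L with
  | [] =>
    match d with
    | some x => [x]
    | none => []
  | (n, o) :: t =>
    if n == o then
      match d with
      | some x => x :: core none t (k + 1)
      | none => core none t (k + 1)
    else
      match d with
      | none => core (some (k, [n])) t (k + 1)
      | some (i, xs) => core (some (i, xs ++ [n])) t (k + 1)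

def finishA (r : List (Int × List Char) × Option (Int × List Char)) : List (Int × List Char) :=
  match r.2 with
  | some d => r.1 ++ [d]
  | none => r.1

theorem foldA_core (L : List (Char × Char)) : ∀ (k : Int) (ds : List (Int × List Char)) (d : Option (Int × List Char)),
    finishA ((PySem.List.enumerate L k).foldl stepA (ds, d)) = ds ++ core d L k := by
  induction L with
  | nil =>
    intro k ds d
    cases d <;> simp [PySem.List.enumerate, finishA, core]
  | cons p t ih =>
    intro k ds d
    obtain ⟨n, o⟩ := p
    rw [PySem.List.enumerate_cons, List.foldl_cons]
    by_cases hno : n == o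
    · cases d with
      | none => simp [stepA, hno, core, ih]
      | some x => simp [stepA, hno, core, ih]
    · cases d with
      | none => simp [stepA, hno, core, ih]
      | some x =>
        obtain ⟨i, xs⟩ := x
        simp [stepA, hno, core, ih]

theorem compute_edits_eq_core (old new : String) :
    compute_edits old new =
      (core none (new.toList.zip old.toList) 0).map (fun p => (p.1, String.mk p.2)) := by
  have h := foldA_core (new.toList.zip old.toList) 0 [] none
  simp only [compute_edits, finishA] at h ⊢
  rw [h]
  simp

theorem bScan_le_m (nl ol : List Char) (m : Nat) : ∀ (j : Nat), j ≤ m → bScan nl ol m j ≤ m := by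
  intro j hj
  unfold bScan
  split
  · next h => exact bScan_le_m nl ol m (j + 1) (by omega)
  · exact hj
termination_by j => m - j
decreasing_by omega

-- pending-run lemma: core with a live delta consumes exactly the mismatch run found by bScan
theorem core_pend (nl ol : List Char) (m : Nat) (hm : m = min nl.length ol.length) :
    ∀ (j : Nat) (idx : Int) (xs : List Char), j ≤ m →
      core (some (idx, xs)) ((nl.zip ol).drop j) (j : Int) =
        (idx, xs ++ (nl.drop j).take (bScan nl ol m j - j)) ::
          core none ((nl.zip ol).drop (bScan nl ol m j)) ((bScan nl ol m j : Nat) : Int) := by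
  intro j idx xs hj
  have hlen : ((nl.zip ol)).length = m := by simp [hm, List.length_zip]
  rw [bScan]
  split
  · next h =>
    obtain ⟨hjm, hne⟩ := h
    have hjz : j < (nl.zip ol).length := by omega
    have hjn : j < nl.length := by omega
    have hjo : j < ol.length := by omega
    have hdrop : (nl.zip ol).drop j = (nl[j], ol[j]) :: (nl.zip ol).drop (j + 1) := by
      rw [List.drop_eq_getElem_cons hjz]; simp
    have hgn : nl.getD j ' ' = nl[j] := List.getD_eq_getElem nl ' ' hjn
    have hgo : ol.getD j ' ' = ol[j] := List.getD_eq_getElem ol ' ' hjo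
    rw [hgn, hgo] at hne
    rw [hdrop]
    have hne' : ¬ (nl[j] == ol[j]) = true := by simpa using hne
    have ih := core_pend nl ol m hm (j + 1) idx (xs ++ [nl[j]]) (by omega)
    simp only [core, hne']
    have hcast : ((j : Int) + 1) = ((j + 1 : Nat) : Int) := by push_cast; ring
    rw [if_neg (by simpa using hne'), hcast, ih]
    have hb1 : j + 1 ≤ bScan nl ol m (j + 1) := le_bScan nl ol m (j + 1)
    have hdropn : nl.drop j = nl[j] :: nl.drop (j + 1) := by
      rw [List.drop_eq_getElem_cons hjn]
    rw [hdropn]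
    have : bScan nl ol m (j + 1) - j = (bScan nl ol m (j + 1) - (j + 1)) + 1 := by omega
    rw [this, List.take_succ_cons]
    simp
  · next h =>
    by_cases hjm : j < m
    · -- chars equal at j: one matching step of core with a pending delta emits it
      have heq : nl.getD j ' ' = ol.getD j ' ' := by
        by_contra hc
        exact h ⟨hjm, hc⟩
      have hjz : j < (nl.zip ol).length := by omega
      have hjn : j < nl.length := by omega
      have hjo : j < ol.length := by omega
      have hdrop : (nl.zip ol).drop j = (nl[j], ol[j]) :: (nl.zip ol).drop (j + 1) := by
        rw [List.drop_eq_getElem_cons hjz]; simp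
      have hgn : nl.getD j ' ' = nl[j] := List.getD_eq_getElem nl ' ' hjn
      have hgo : ol.getD j ' ' = ol[j] := List.getD_eq_getElem ol ' ' hjo
      have heq' : (nl[j] == ol[j]) = true := by
        rw [← hgn, ← hgo]; simpa using heq
      conv_lhs => rw [hdrop]
      conv_rhs => rw [hdrop]
      simp only [core]
      rw [if_pos heq', if_pos heq', Nat.sub_self]
      simp
    · -- j = m: the zipped list is exhausted
      have hj' : j = m := by omega
      have hdrop : (nl.zip ol).drop j = [] := by
        apply List.drop_eq_nil_of_le; omega
      rw [hdrop, Nat.sub_self]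
      simp [core]
termination_by j => m - j
decreasing_by omega

theorem bLoop_eq_core (nl ol : List Char) (m : Nat) (hm : m = min nl.length ol.length) :
    ∀ (i : Nat), i ≤ m →
      bLoop nl ol m i =
        (core none ((nl.zip ol).drop i) (i : Int)).map (fun p => (p.1, String.mk p.2)) := by
  intro i hi
  rw [bLoop]
  split
  · next him =>
    have hin : i < nl.length := by omega
    have hio : i < ol.length := by omega
    have hiz : i < (nl.zip ol).length := by simp [List.length_zip]; omega
    have hdrop : (nl.zip ol).drop i = (nl[i], ol[i]) :: (nl.zip ol).drop (i + 1) := by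
      rw [List.drop_eq_getElem_cons hiz]; simp
    have hgn : nl.getD i ' ' = nl[i] := List.getD_eq_getElem nl ' ' hin
    have hgo : ol.getD i ' ' = ol[i] := List.getD_eq_getElem ol ' ' hio
    rw [hdrop]
    by_cases heq : (nl.getD i ' ' == ol.getD i ' ') = true
    · have heq' : (nl[i] == ol[i]) = true := by rw [← hgn, ← hgo]; exact heq
      rw [if_pos heq]
      have ih := bLoop_eq_core nl ol m hm (i + 1) (by omega)
      rw [ih]
      have hcast : ((i : Int) + 1) = ((i + 1 : Nat) : Int) := by push_cast; ring
      simp only [core, heq', if_pos, hcast]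
    · have heq' : ¬ (nl[i] == ol[i]) = true := by rw [← hgn, ← hgo]; exact heq
      rw [if_neg heq]
      conv_rhs => simp only [core]
      rw [if_neg heq']
      have hcast : ((i : Int) + 1) = ((i + 1 : Nat) : Int) := by push_cast; ring
      rw [hcast, core_pend nl ol m hm (i + 1) (i : Int) [nl[i]] (by omega)]
      have hb1 : i + 1 ≤ bScan nl ol m (i + 1) := le_bScan nl ol m (i + 1)
      have hbm : bScan nl ol m (i + 1) ≤ m := bScan_le_m nl ol m (i + 1) (by omega)
      have ih := bLoop_eq_core nl ol m hm (bScan nl ol m (i + 1)) hbm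
      rw [List.map_cons, ih]
      congr 1
      -- head: the slice equals the accumulated run characters
      have hslice : PySem.List.slice nl (some (i : Int)) (some ((bScan nl ol m (i + 1) : Nat) : Int)) =
          (nl.drop i).take (bScan nl ol m (i + 1) - i) := PySem.List.slice_natCast nl i _
      simp only [hslice]
      have hdropn : nl.drop i = nl[i] :: nl.drop (i + 1) := by
        rw [List.drop_eq_getElem_cons hin]
      rw [hdropn]
      have : bScan nl ol m (i + 1) - i = (bScan nl ol m (i + 1) - (i + 1)) + 1 := by omega
      rw [this, List.take_succ_cons]
      simp
  · next him =>
    have hdrop : (nl.zip ol).drop i = [] := by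
      apply List.drop_eq_nil_of_le; simp [List.length_zip]; omega
    rw [hdrop]
    simp [core]
termination_by i => m - i
decreasing_by
  · omega
  · have := le_bScan nl ol m (i + 1); omega

-- ===== VERDICT (by name: the statement is the Claim_ definition above) =====
theorem compute_edits_spec : Claim_equal_compute_edits := by
  intro old new _
  show compute_edits old new = compute_edits_alt old new
  rw [compute_edits_eq_core]
  unfold compute_edits_alt
  have hm : min old.toList.length new.toList.length = min new.toList.length old.toList.length :=
    Nat.min_comm _ _
  rw [hm, bLoop_eq_core new.toList old.toList _ rfl 0 (Nat.zero_le _)]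
  simp
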